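-- pv_equiv track=rewrite | github.com/lothronx/cm3035-car-api | cars/models.py | _get_displacement_category
-- ===== SOURCE A (Python) =====
-- def _get_displacement_category(capacity):
--     """
--     Determines the engine displacement category based on capacity.
--
--     Args:
--         capacity (int): Engine capacity in cc
--
--     Returns:
--         str: Displacement category (SMALL, LOW_MID, MID, LARGE, VERY_LARGE, or EXTREME)
--     """
--     ranges = [
--         (1000, "SMALL"),
--         (1600, "LOW_MID"),
--         (2500, "MID"),
--         (4000, "LARGE"),
--         (6000, "VERY_LARGE"),
--         (float("inf"), "EXTREME"),
--     ]
--     for limit, category in ranges: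
--         if capacity <= limit:
--             return category
-- ===== SOURCE B (Python) =====
-- import bisect
--
-- _THRESHOLDS = [1000, 1600, 2500, 4000, 6000]
-- _CATEGORIES = ["SMALL", "LOW_MID", "MID", "LARGE", "VERY_LARGE", "EXTREME"]
--
--
-- def _get_displacement_category(capacity):
--     return _CATEGORIES[bisect.bisect_left(_THRESHOLDS, capacity)]
-- ===== Notes on version B (the rewrite author's own statement) =====
-- stated objective: idiomatic
-- what changed: Replaces the linear scan over (limit, category) pairs (with a float('inf') sentinel) by a bisect_left binary search into a threshold array indexing a parallel category list.
import Mathlib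
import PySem

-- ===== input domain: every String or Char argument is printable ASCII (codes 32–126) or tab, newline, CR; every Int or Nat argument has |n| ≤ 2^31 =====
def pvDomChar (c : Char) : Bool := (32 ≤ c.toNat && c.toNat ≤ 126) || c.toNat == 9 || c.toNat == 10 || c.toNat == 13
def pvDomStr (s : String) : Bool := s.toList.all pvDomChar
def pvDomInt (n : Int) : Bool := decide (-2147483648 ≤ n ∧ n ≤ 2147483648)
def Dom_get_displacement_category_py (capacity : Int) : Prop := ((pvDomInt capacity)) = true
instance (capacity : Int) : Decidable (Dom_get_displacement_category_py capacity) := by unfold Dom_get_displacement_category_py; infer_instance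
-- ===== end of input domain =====

-- B replaces A's linear scan with sentinel by bisect_left into a threshold array (idiomatic).

-- ===== PORT A =====
-- the limit is Option Int: 'none' transliterates float("inf") (capacity <= inf is always true for an int)
def pvRangesA : List (Option Int × String) :=
  [(some 1000, "SMALL"), (some 1600, "LOW_MID"), (some 2500, "MID"),
   (some 4000, "LARGE"), (some 6000, "VERY_LARGE"), (none, "EXTREME")]

def pvScanA (capacity : Int) : List (Option Int × String) → String
  | [] => ""  -- unreachable: Python's implicit 'return None' after the loop never fires (inf sentinel)
  | (limit, category) :: rest =>
      if (match limit with | none => true | some l => capacity ≤ l) then category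
      else pvScanA capacity rest

def get_displacement_category_py (capacity : Int) : String :=
  pvScanA capacity pvRangesA

-- ===== PORT B =====
def pvThresholds : List Int := [1000, 1600, 2500, 4000, 6000]
def pvCategories : List String := ["SMALL", "LOW_MID", "MID", "LARGE", "VERY_LARGE", "EXTREME"]

-- bisect.bisect_left's while-loop, fueled (fuel ≥ hi - lo suffices)
def pvBisectLeft (a : List Int) (x : Int) (lo hi : Nat) : Nat → Nat
  | 0 => lo
  | fuel + 1 =>
      if lo < hi then
        let mid := (lo + hi) / 2
        if a.getD mid 0 < x then pvBisectLeft a x (mid + 1) hi fuel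
        else pvBisectLeft a x lo mid fuel
      else lo

def get_displacement_category_py_alt (capacity : Int) : String :=
  pvCategories.getD (pvBisectLeft pvThresholds capacity 0 5 5) ""

-- ===== PRECONDITION & SPEC =====
def Spec_get_displacement_category_py (capacity : Int) (out : String) : Prop := out = get_displacement_category_py_alt capacity
instance (capacity : Int) (out : String) : Decidable (Spec_get_displacement_category_py capacity out) := by unfold Spec_get_displacement_category_py; infer_instance

-- ===== CLAIM (what is proved, stated in full; the proofs are below) =====
def Claim_equal_get_displacement_category_py : Prop := ∀ (capacity : Int), Dom_get_displacement_category_py capacity → Spec_get_displacement_category_py capacity (get_displacement_category_py capacity)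

-- ===== LEMMAS AND PROOFS =====

-- ===== VERDICT (by name: the statement is the Claim_ definition above) =====
theorem get_displacement_category_py_spec : Claim_equal_get_displacement_category_py := by
  intro c _
  unfold Spec_get_displacement_category_py get_displacement_category_py get_displacement_category_py_alt
  simp [pvScanA, pvRangesA, pvBisectLeft, pvThresholds, pvCategories, List.getD]
  split_ifs <;> first | rfl | omega
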